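-- pv_equiv track=rewrite | github.com/tsitsidalakishvili/FS | crm/analytics/people.py | pick_education
-- ===== SOURCE A (Python) =====
-- def _education_score(level):
--     if not level:
--         return 0
--     text = str(level).lower()
--     if "phd" in text:
--         return 4
--     if "master" in text:
--         return 3
--     if "bachelor" in text:
--         return 2
--     if "high" in text:
--         return 1
--     return 0
--
-- def pick_education(levels):
--     levels = levels or []
--     cleaned = [str(x).strip() for x in levels if str(x).strip()]
--     if not cleaned:
--         return ("Unspecified", 0)
--     scored = [(level, _education_score(level)) for level in cleaned]
--     scored = sorted(scored, key=lambda item: item[1], reverse=True)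
--     return scored[0]
-- ===== SOURCE B (Python) =====
-- _KEYWORDS = (("phd", 4), ("master", 3), ("bachelor", 2), ("high", 1))
--
--
-- def _tier(level):
--     text = level.lower()
--     for kw, score in _KEYWORDS:
--         if kw in text:
--             return score
--     return 0
--
--
-- def pick_education(levels):
--     cleaned = []
--     for x in levels or []:
--         s = str(x).strip()
--         if s:
--             cleaned.append(s)
--     if not cleaned:
--         return ("Unspecified", 0)
--     for target in (4, 3, 2, 1):
--         for level in cleaned:
--             if _tier(level) == target:
--                 return (level, target)
--     return (cleaned[0], 0)
-- ===== Notes on version B (the rewrite author's own statement) =====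
-- stated objective: alternative
-- what changed: Instead of scoring every element and running a stable descending sort to take its head, B probes score tiers from highest to lowest and returns the first element of the highest non-empty tier (no sort, no scored list).
import Mathlib
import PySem

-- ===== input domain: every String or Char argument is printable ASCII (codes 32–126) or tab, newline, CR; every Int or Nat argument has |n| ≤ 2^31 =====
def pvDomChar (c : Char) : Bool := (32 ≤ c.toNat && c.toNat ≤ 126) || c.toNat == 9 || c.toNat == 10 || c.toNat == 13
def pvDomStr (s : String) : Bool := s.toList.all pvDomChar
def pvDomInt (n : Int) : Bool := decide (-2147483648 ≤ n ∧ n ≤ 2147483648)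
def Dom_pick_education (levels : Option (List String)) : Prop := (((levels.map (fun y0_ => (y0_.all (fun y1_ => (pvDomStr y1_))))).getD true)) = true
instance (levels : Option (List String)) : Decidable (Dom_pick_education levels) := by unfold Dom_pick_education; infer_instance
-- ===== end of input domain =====

-- B replaces A's score-everything-then-stable-sort with a highest-tier-first nested scan (no sort); same return value.

-- ===== PORT A =====
def education_score (level : String) : Int :=
  if level = "" then 0
  else
    let text := PySem.Str.lower level
    if PySem.Str.isIn "phd" text then 4
    else if PySem.Str.isIn "master" text then 3
    else if PySem.Str.isIn "bachelor" text then 2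
    else if PySem.Str.isIn "high" text then 1
    else 0

def pick_education (levels : Option (List String)) : String × Int :=
  let lv := levels.getD []
  let cleaned := lv.filterMap (fun x =>
    let s := PySem.Str.strip x
    if s = "" then none else some s)
  if cleaned = [] then ("Unspecified", 0)
  else
    let scored := cleaned.map (fun level => (level, education_score level))
    let scoredSorted := PySem.List.sorted scored (fun item => item.2) true
    scoredSorted.headD ("Unspecified", 0)

-- ===== PORT B =====
def eduKeywords : List (String × Int) := [("phd", 4), ("master", 3), ("bachelor", 2), ("high", 1)]

def edu_tier (level : String) : Int :=
  let text := PySem.Str.lower level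
  match eduKeywords.find? (fun p => PySem.Str.isIn p.1 text) with
  | some p => p.2
  | none => 0

def pick_education_alt (levels : Option (List String)) : String × Int :=
  let cleaned := (levels.getD []).filterMap (fun x =>
    let s := PySem.Str.strip x
    if s = "" then none else some s)
  match cleaned with
  | [] => ("Unspecified", 0)
  | c0 :: _ =>
    match ([4, 3, 2, 1] : List Int).findSome? (fun target =>
        (cleaned.find? (fun level => edu_tier level == target)).map
          (fun level => (level, target))) with
    | some r => r
    | none => (c0, 0)

-- ===== PRECONDITION & SPEC =====
def Spec_pick_education (levels : Option (List String)) (out : String × Int) : Prop := out = pick_education_alt levels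
instance (levels : Option (List String)) (out : String × Int) : Decidable (Spec_pick_education levels out) := by unfold Spec_pick_education; infer_instance

-- ===== CLAIM (what is proved, stated in full; the proofs are below) =====
def Claim_equal_pick_education : Prop := ∀ (levels : Option (List String)), Dom_pick_education levels → Spec_pick_education levels (pick_education levels)

-- ===== LEMMAS AND PROOFS =====

-- B's keyword-table tier equals A's if-chain score on every string.
theorem tier_eq_score (l : String) : edu_tier l = education_score l := by
  by_cases h : l = ""
  · subst h; decide
  · unfold edu_tier education_score eduKeywords
    rw [if_neg h]
    cases h1 : PySem.Chars.isIn ['p','h','d'] (PySem.Chars.lower l.toList) <;>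
      cases h2 : PySem.Chars.isIn ['m','a','s','t','e','r'] (PySem.Chars.lower l.toList) <;>
        cases h3 : PySem.Chars.isIn ['b','a','c','h','e','l','o','r'] (PySem.Chars.lower l.toList) <;>
          cases h4 : PySem.Chars.isIn ['h','i','g','h'] (PySem.Chars.lower l.toList) <;>
            simp [List.find?, h1, h2, h3, h4]

theorem score_mem (l : String) : education_score l ∈ ([4, 3, 2, 1, 0] : List Int) := by
  by_cases h : l = ""
  · simp [education_score, h]
  · unfold education_score
    rw [if_neg h]
    cases h1 : PySem.Chars.isIn ['p','h','d'] (PySem.Chars.lower l.toList) <;>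
      cases h2 : PySem.Chars.isIn ['m','a','s','t','e','r'] (PySem.Chars.lower l.toList) <;>
        cases h3 : PySem.Chars.isIn ['b','a','c','h','e','l','o','r'] (PySem.Chars.lower l.toList) <;>
          cases h4 : PySem.Chars.isIn ['h','i','g','h'] (PySem.Chars.lower l.toList) <;>
            simp [h1, h2, h3, h4]

theorem insertBy_append_left {α : Type} (before : α → α → Bool) (x : α) (A B : List α)
    (h : ∀ a ∈ A, before x a = false) :
    PySem.List.insertBy before x (A ++ B) = A ++ PySem.List.insertBy before x B := by
  induction A with
  | nil => rfl
  | cons a A ih =>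
    have ha : before x a = false := h a (by simp)
    have ih' := ih (fun y hy => h y (by simp [hy]))
    rw [List.cons_append,
      show PySem.List.insertBy before x (a :: (A ++ B))
          = if before x a then x :: a :: (A ++ B) else a :: PySem.List.insertBy before x (A ++ B) from rfl,
      ha]
    simp only [Bool.false_eq_true, if_false]
    rw [ih', List.cons_append]

theorem flatMap_filter_snoc {α : Type} (key : α → Int) (x : α) (ts : List Int)
    (h : ∀ u ∈ ts, key x ≠ u) (xs : List α) :
    ts.flatMap (fun t => (xs ++ [x]).filter (fun y => key y == t))
      = ts.flatMap (fun t => xs.filter (fun y => key y == t)) := by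
  induction ts with
  | nil => rfl
  | cons u ts ih =>
    rw [List.flatMap_cons, List.flatMap_cons, ih (fun v hv => h v (by simp [hv]))]
    have hxu : (key x == u) = false := beq_eq_false_iff_ne.mpr (h u (by simp))
    simp [List.filter_append, hxu]

-- inserting x into the tier decomposition appends it at the end of its own tier
theorem ins_flatMap {α : Type} (key : α → Int) (ts : List Int) (hts : ts.Pairwise (· > ·))
    (x : α) (hx : key x ∈ ts) (xs : List α) :
    PySem.List.insertBy (fun a b => decide (key b < key a)) x
        (ts.flatMap (fun t => xs.filter (fun y => key y == t)))
      = ts.flatMap (fun t => (xs ++ [x]).filter (fun y => key y == t)) := by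
  induction ts with
  | nil => simp at hx
  | cons t ts' ih =>
    have hgt : ∀ u ∈ ts', t > u := (List.pairwise_cons.mp hts).1
    have hts' : ts'.Pairwise (· > ·) := (List.pairwise_cons.mp hts).2
    simp only [List.flatMap_cons]
    by_cases hk : key x = t
    · -- x lands at the end of tier t
      have hA : ∀ a ∈ xs.filter (fun y => key y == t), (fun a b => decide (key b < key a)) x a = false := by
        intro a ha
        have := List.of_mem_filter ha
        simp only [beq_iff_eq] at this
        simp [this, hk]
      rw [insertBy_append_left _ _ _ _ hA]
      have hB : PySem.List.insertBy (fun a b => decide (key b < key a)) x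
          (ts'.flatMap (fun t => xs.filter (fun y => key y == t)))
          = x :: ts'.flatMap (fun t => xs.filter (fun y => key y == t)) := by
        cases hBc : ts'.flatMap (fun t => xs.filter (fun y => key y == t)) with
        | nil => simp [PySem.List.insertBy]
        | cons b B' =>
          have hbmem : b ∈ ts'.flatMap (fun t => xs.filter (fun y => key y == t)) := by
            rw [hBc]; simp
          obtain ⟨u, hu, hbf⟩ := List.mem_flatMap.mp hbmem
          have hbu : key b = u := by simpa using (List.of_mem_filter hbf)
          have hlt : key b < key x := by rw [hbu, hk]; exact hgt u hu
          rw [show PySem.List.insertBy (fun a b => decide (key b < key a)) x (b :: B')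
              = if decide (key b < key x) then x :: b :: B' else b :: PySem.List.insertBy (fun a b => decide (key b < key a)) x B' from rfl]
          simp [hlt]
      rw [hB]
      have htier : (xs ++ [x]).filter (fun y => key y == t) = xs.filter (fun y => key y == t) ++ [x] := by
        simp [List.filter_append, hk]
      have hrest : ∀ u ∈ ts', key x ≠ u := by
        intro u hu he
        exact absurd (hk ▸ he ▸ hgt u hu) (lt_irrefl _)
      rw [htier, flatMap_filter_snoc key x ts' hrest xs]
      simp
    · -- x's tier is deeper
      have hx' : key x ∈ ts' := by
        rcases List.mem_cons.mp hx with h | h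
        · exact absurd h hk
        · exact h
      have hA : ∀ a ∈ xs.filter (fun y => key y == t), (fun a b => decide (key b < key a)) x a = false := by
        intro a ha
        have hat : key a = t := by simpa using (List.of_mem_filter ha)
        have : key x < key a := by rw [hat]; exact hgt _ hx'
        simp; omega
      rw [insertBy_append_left _ _ _ _ hA, ih hts' hx']
      have : (xs ++ [x]).filter (fun y => key y == t) = xs.filter (fun y => key y == t) := by
        have hne : (key x == t) = false := beq_eq_false_iff_ne.mpr hk
        simp [List.filter_append, hne]
      rw [this]

-- the stable descending sort IS the tier decomposition
theorem sorted_rev_eq_flatMap {α : Type} (key : α → Int) (ts : List Int) (hts : ts.Pairwise (· > ·))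
    (xs : List α) (hxs : ∀ y ∈ xs, key y ∈ ts) :
    PySem.List.sorted xs key true = ts.flatMap (fun t => xs.filter (fun y => key y == t)) := by
  rw [PySem.List.sorted_rev_eq_foldl_insertBy]
  induction xs using List.reverseRecOn with
  | nil => simp
  | append_singleton ys x ih =>
    rw [List.foldl_append]
    simp only [List.foldl_cons, List.foldl_nil]
    rw [ih (fun y hy => hxs y (by simp [hy]))]
    exact ins_flatMap key ts hts x (hxs x (by simp)) ys

-- picking the head of the tier decomposition = probing the tiers from high to low
theorem tiers_select (ts : List Int) (c0 : String) (rest : List String)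
    (h : ∀ l ∈ c0 :: rest, education_score l ∈ ts ∨ education_score l = 0) :
    (((ts ++ [0]).flatMap (fun t => ((c0 :: rest).map (fun l => (l, education_score l))).filter (fun p : String × Int => p.2 == t))).headD ("Unspecified", 0))
      = (match ts.findSome? (fun target => ((c0 :: rest).find? (fun l => education_score l == target)).map (fun l => (l, target))) with
        | some r => r
        | none => (c0, 0)) := by
  induction ts with
  | nil =>
    have hall : ∀ l ∈ c0 :: rest, ((fun p : String × Int => p.2 == (0:Int)) ∘ (fun l => (l, education_score l))) l = true := by
      intro l hl; rcases h l hl with h0 | h0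
      · simp at h0
      · simp [h0]
    simp only [List.nil_append, List.flatMap_cons, List.flatMap_nil, List.append_nil, List.findSome?_nil]
    rw [List.filter_map, List.filter_eq_self.mpr hall]
    have h0 : education_score c0 = 0 := by
      rcases h c0 (by simp) with h0 | h0
      · simp at h0
      · exact h0
    simp [h0]
  | cons t ts ih =>
    rcases hf : (c0 :: rest).find? (fun l => education_score l == t) with _ | l
    · -- tier t is empty
      have hfil : ((c0 :: rest).map (fun l => (l, education_score l))).filter (fun p : String × Int => p.2 == t) = [] := by
        rw [List.filter_map, List.filter_eq_nil_iff.mpr, List.map_nil]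
        intro a ha
        simpa using List.find?_eq_none.mp hf a ha
      have h' : ∀ l ∈ c0 :: rest, education_score l ∈ ts ∨ education_score l = 0 := by
        intro l hl
        rcases h l hl with hm | h0
        · rcases List.mem_cons.mp hm with he | hm'
          · exact absurd (by simpa using he) (List.find?_eq_none.mp hf l hl)
          · exact Or.inl hm'
        · exact Or.inr h0
      rw [List.cons_append, List.flatMap_cons, hfil, List.nil_append, List.findSome?_cons]
      simp only [hf, Option.map_none]
      exact ih h'
    · -- l is the first element of tier t
      have hsc : education_score l = t := by simpa using List.find?_some hf
      have hhead : (((c0 :: rest).map (fun l => (l, education_score l))).filter (fun p : String × Int => p.2 == t)).head? = some (l, t) := by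
        rw [List.head?_filter, List.find?_map,
          show ((fun (p : String × Int) => p.2 == t) ∘ (fun l => (l, education_score l))) = (fun l => education_score l == t) from rfl,
          hf, Option.map_some, hsc]
      rw [List.cons_append, List.flatMap_cons, List.headD_eq_head?_getD, List.head?_append, hhead,
        List.findSome?_cons]
      simp [hf]

-- both bodies as a function of the shared 'cleaned' list
theorem pick_core (cleaned : List String) :
    (if cleaned = [] then (("Unspecified", 0) : String × Int)
     else (PySem.List.sorted (cleaned.map (fun level => (level, education_score level))) (fun item => item.2) true).headD ("Unspecified", 0))
      = (match cleaned with
        | [] => (("Unspecified", 0) : String × Int)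
        | c0 :: _ =>
          match ([4, 3, 2, 1] : List Int).findSome? (fun target =>
              (cleaned.find? (fun level => edu_tier level == target)).map (fun level => (level, target))) with
          | some r => r
          | none => (c0, 0)) := by
  cases cleaned with
  | nil => simp
  | cons c0 rest =>
    rw [if_neg (by simp)]
    simp only [tier_eq_score]
    rw [sorted_rev_eq_flatMap (fun item : String × Int => item.2) ([4, 3, 2, 1, 0]) (by decide) _
      (by
        intro y hy
        obtain ⟨l, _, rfl⟩ := List.mem_map.mp hy
        exact score_mem l)]
    have hmem : ∀ l ∈ c0 :: rest, education_score l ∈ ([4, 3, 2, 1] : List Int) ∨ education_score l = 0 := by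
      intro l _
      have := score_mem l
      simp only [List.mem_cons, List.not_mem_nil, or_false] at this ⊢
      omega
    exact tiers_select [4, 3, 2, 1] c0 rest hmem

-- ===== VERDICT (by name: the statement is the Claim_ definition above) =====
theorem pick_education_spec : Claim_equal_pick_education := by
  intro levels _
  show pick_education levels = pick_education_alt levels
  exact pick_core ((levels.getD []).filterMap (fun x =>
    let s := PySem.Str.strip x
    if s = "" then none else some s))
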